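-- pv_equiv track=rewrite | github.com/daveymclain/advent_of_code_2020 | Day 23.py | after_one
-- ===== SOURCE A (Python) =====
-- def wrap_around_select(pos, cups):
--     if pos > cups - 1:
--         return pos % (cups)
--     return pos
--
-- def after_one(cups):
--     result = ""
--     for pos, cup in enumerate(cups):
--         if cup == 1:
--             for i in range(len(cups) - 1):
--                 pos += 1
--                 result += str(cups[wrap_around_select(pos, len(cups))])
--     return result
-- ===== SOURCE B (Python) =====
-- def after_one(cups):
--     n = len(cups)
--     doubled = cups + cups
--     return "".join(
--         "".join(map(str, doubled[i + 1:i + n]))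
--         for i, c in enumerate(cups) if c == 1
--     )
-- ===== Notes on version B (the rewrite author's own statement) =====
-- stated objective: simpler
-- what changed: Replaces A's per-step wrap_around_select modulo indexing and string accumulation with one doubled list built once and a single slice joined per occurrence of cup 1.
import Mathlib
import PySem

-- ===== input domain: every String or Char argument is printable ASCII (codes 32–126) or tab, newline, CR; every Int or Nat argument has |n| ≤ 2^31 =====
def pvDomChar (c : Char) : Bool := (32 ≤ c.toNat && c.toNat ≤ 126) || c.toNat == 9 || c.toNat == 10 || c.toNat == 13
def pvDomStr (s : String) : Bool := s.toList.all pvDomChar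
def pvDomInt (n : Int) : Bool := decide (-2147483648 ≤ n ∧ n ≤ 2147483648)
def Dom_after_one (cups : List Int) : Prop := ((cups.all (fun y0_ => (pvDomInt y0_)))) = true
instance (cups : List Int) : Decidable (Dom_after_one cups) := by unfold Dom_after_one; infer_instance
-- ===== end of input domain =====

-- B replaces A's modulo-indexed inner loop with one slice of a doubled list joined per hit; same return value, simpler decomposition.

-- ===== PORT A =====
def wrap_around_select (pos : Int) (cups : Int) : Int :=
  if pos > cups - 1 then PySem.Int.mod pos cups else pos

def after_one (cups : List Int) : String :=
  (PySem.List.enumerate cups 0).foldl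
    (fun result pc =>
      if pc.2 == 1 then
        ((PySem.List.pyRange 0 ((cups.length : Int) - 1) 1).foldl
          (fun (st : String × Int) _ =>
            let pos := st.2 + 1
            -- cups[...] : the wrapped index is provably in range, the default 0 is never read
            (st.1 ++ PySem.Int.toStr (PySem.List.pyGetD cups (wrap_around_select pos (cups.length : Int)) 0), pos))
          (result, pc.1)).1
      else result) ""

-- ===== PORT B =====
def after_one_alt (cups : List Int) : String :=
  let n : Int := (cups.length : Int)
  let doubled := cups ++ cups
  PySem.Str.join ""
    (((PySem.List.enumerate cups 0).filter (fun pc => pc.2 == 1)).map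
      (fun pc =>
        PySem.Str.join ""
          ((PySem.List.slice doubled (some (pc.1 + 1)) (some (pc.1 + n))).map PySem.Int.toStr)))

-- ===== PRECONDITION & SPEC =====
def Spec_after_one (cups : List Int) (out : String) : Prop := out = after_one_alt cups
instance (cups : List Int) (out : String) : Decidable (Spec_after_one cups out) := by unfold Spec_after_one; infer_instance

-- ===== CLAIM (what is proved, stated in full; the proofs are below) =====
def Claim_equal_after_one : Prop := ∀ (cups : List Int), Dom_after_one cups → Spec_after_one cups (after_one cups)

-- ===== LEMMAS AND PROOFS =====

-- characters emitted by A's inner loop starting after position q, m steps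
def pvPieces (cups : List Int) (q : Int) : Nat → List Char
  | 0 => []
  | m + 1 =>
      (PySem.Int.toStr (PySem.List.pyGetD cups (wrap_around_select (q + 1) (cups.length : Int)) 0)).toList
        ++ pvPieces cups (q + 1) m

-- "".join at the character level is flatten
theorem pvJoin_empty_toList (ss : List String) :
    (PySem.Str.join "" ss).toList = (ss.map String.toList).flatten := by
  rw [PySem.Str.toList_join]
  induction ss with
  | nil => simp [PySem.Chars.join_nil]
  | cons a rest ih =>
      cases rest with
      | nil => simp [PySem.Chars.join_singleton]
      | cons b r =>
          simp only [List.map_cons] at ih ⊢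
          rw [PySem.Chars.join_cons_cons]
          simp only [List.flatten_cons] at ih ⊢
          rw [ih]; simp

-- A's inner fold, fully characterised (the range elements are ignored; only the length matters)
theorem pvInner_fold (cups : List Int) (l : List Int) (res : String) (q : Int) :
    l.foldl
      (fun (st : String × Int) _ =>
        (st.1 ++ PySem.Int.toStr (PySem.List.pyGetD cups (wrap_around_select (st.2 + 1) (cups.length : Int)) 0),
         st.2 + 1))
      (res, q)
    = (String.ofList (res.toList ++ pvPieces cups q l.length), q + l.length) := by
  induction l generalizing res q with
  | nil => simp [pvPieces]
  | cons x xs ih =>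
      simp only [List.foldl_cons, List.length_cons]
      rw [ih]
      simp only [Prod.mk.injEq]
      refine ⟨?_, by push_cast; ring⟩
      congr 1
      simp [pvPieces, List.append_assoc]

-- the wrapped lookup into cups is exactly a lookup into cups ++ cups
theorem pvWrap_getD (cups : List Int) (j : Nat) (h2 : j < 2 * cups.length) :
    PySem.List.pyGetD cups (wrap_around_select (j : Int) (cups.length : Int)) 0
      = (cups ++ cups).getD j 0 := by
  unfold wrap_around_select
  by_cases hc : (j : Int) > (cups.length : Int) - 1
  · have hn : cups.length ≤ j := by omega
    have hmod : PySem.Int.mod (j : Int) (cups.length : Int) = ((j - cups.length : Nat) : Int) := by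
      have hb : (0 : Int) < (cups.length : Int) := by omega
      have : (j : Int).fmod (cups.length : Int) = (j : Int) % (cups.length : Int) := by
        rw [Int.fmod_eq_emod]
        simp [hb.le]
      rw [PySem.Int.mod, this]
      have h3 : ((j : Int) - cups.length) % (cups.length : Int) = (j : Int) % (cups.length : Int) :=
        Int.sub_emod_right _ _
      rw [← h3, Int.emod_eq_of_lt (by omega) (by omega)]
      push_cast [Nat.cast_sub hn]
      ring
    rw [if_pos hc, hmod, PySem.List.pyGetD_natCast]
    rw [List.getD_eq_getElem?_getD, List.getD_eq_getElem?_getD,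
        List.getElem?_append_right hn]
  · have hj : j < cups.length := by omega
    rw [if_neg hc, PySem.List.pyGetD_natCast]
    rw [List.getD_eq_getElem?_getD, List.getD_eq_getElem?_getD,
        List.getElem?_append_left hj]

-- pvPieces = the corresponding segment of cups ++ cups, rendered
theorem pvPieces_eq_slice (cups : List Int) (q m : Nat) (h : q + m < 2 * cups.length) :
    pvPieces cups (q : Int) m
      = (((((cups ++ cups).drop (q + 1)).take m).map PySem.Int.toStr).map String.toList).flatten := by
  induction m generalizing q with
  | zero => simp [pvPieces]
  | succ m ih =>
      have hq1 : q + 1 < (cups ++ cups).length := by simp; omega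
      have hdt : ((cups ++ cups).drop (q + 1)).take (m + 1)
          = (cups ++ cups).getD (q + 1) 0 :: (((cups ++ cups).drop (q + 1 + 1)).take m) := by
        rw [List.drop_eq_getElem_cons hq1, List.take_succ_cons, List.getD_eq_getElem _ _ hq1]
      rw [hdt]
      simp only [pvPieces, List.map_cons, List.flatten_cons]
      rw [show ((q : Int) + 1) = ((q + 1 : Nat) : Int) by push_cast; ring]
      rw [pvWrap_getD cups (q + 1) (by omega), ih (q + 1) (by omega)]

-- slice bounds of B, in Nat form
theorem pvSlice_eq (cups : List Int) (k : Nat) :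
    PySem.List.slice (cups ++ cups) (some ((k : Int) + 1)) (some ((k : Int) + (cups.length : Int)))
      = ((cups ++ cups).drop (k + 1)).take (cups.length - 1) := by
  rw [show ((k : Int) + 1) = ((k + 1 : Nat) : Int) by push_cast; ring,
      show ((k : Int) + (cups.length : Int)) = ((k + cups.length : Nat) : Int) by push_cast; ring,
      PySem.List.slice_natCast]
  congr 1
  omega

-- A's outer fold, characterised against the list of hit positions
theorem pvOuter_fold (cups : List Int) (l : List (Int × Int)) (res : String) :
    l.foldl
      (fun result pc =>
        if pc.2 == 1 then
          ((PySem.List.pyRange 0 ((cups.length : Int) - 1) 1).foldl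
            (fun (st : String × Int) _ =>
              (st.1 ++ PySem.Int.toStr (PySem.List.pyGetD cups (wrap_around_select (st.2 + 1) (cups.length : Int)) 0),
               st.2 + 1))
            (result, pc.1)).1
        else result) res
    = String.ofList (res.toList ++
        ((l.filter (fun pc => pc.2 == 1)).map (fun pc => pvPieces cups pc.1 (cups.length - 1))).flatten) := by
  induction l generalizing res with
  | nil => simp
  | cons pc rest ih =>
      simp only [List.foldl_cons, List.filter_cons]
      by_cases hc : pc.2 == 1
      · rw [if_pos hc, if_pos hc, pvInner_fold, ih]
        have hlen : (PySem.List.pyRange 0 ((cups.length : Int) - 1) 1).length = cups.length - 1 := by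
          rw [PySem.List.length_pyRange_one]; omega
        rw [hlen]
        simp [List.append_assoc]
      · rw [if_neg hc, if_neg hc, ih]

-- ===== VERDICT (by name: the statement is the Claim_ definition above) =====
theorem after_one_spec : Claim_equal_after_one := by
  intro cups _
  unfold Spec_after_one after_one after_one_alt
  simp only []
  rw [pvOuter_fold]
  rw [eq_comm, ← String.toList_inj, pvJoin_empty_toList]
  simp only [String.toList_ofList, String.toList_empty, List.nil_append, List.map_map]
  congr 1
  apply List.map_congr_left
  intro pc hpc
  have hmem : pc ∈ PySem.List.enumerate cups 0 := List.mem_of_mem_filter hpc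
  rw [PySem.List.mem_enumerate_iff] at hmem
  obtain ⟨k, hk, rfl⟩ := hmem
  simp only [Function.comp, zero_add]
  rw [pvSlice_eq, pvJoin_empty_toList]
  rw [pvPieces_eq_slice cups k (cups.length - 1) (by omega)]
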